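-- pv_equiv track=rewrite | github.com/nikitadpopel/advent_of_code_2021 | Python/day03/day03.py | getGammaRate
-- ===== SOURCE A (Python) =====
-- def getGammaRate(binaryList):
--     gammaRate = []
--     for i in range(len(binaryList[0])):
--         oneCnt = 0
--         zeroCnt = 0
--         for j in binaryList:
--             if j[i] == '1':
--                 oneCnt += 1
--             if j[i] == '0':
--                 zeroCnt += 1
--         if oneCnt > zeroCnt:
--             gammaRate.append('0')
--         if zeroCnt > oneCnt:
--             gammaRate.append('1')
--     return gammaRate
-- ===== SOURCE B (Python) =====
-- def getGammaRate(binaryList):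
--     m = len(binaryList[0])
--     ones = [0] * m
--     zeros = [0] * m
--     for s in binaryList:
--         ones = [o + (c == '1') for o, c in zip(ones, s)]
--         zeros = [z + (c == '0') for z, c in zip(zeros, s)]
--     res = []
--     for o, z in zip(ones, zeros):
--         if o > z:
--             res.append('0')
--         elif z > o:
--             res.append('1')
--     return res
-- ===== Notes on version B (the rewrite author's own statement) =====
-- stated objective: alternative
-- what changed: A rescans the whole list once per bit position (column-outer nested scans); B makes a single row-pass building per-position one/zero count tables, then a separate decision pass over the tables.
import Mathlib
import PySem

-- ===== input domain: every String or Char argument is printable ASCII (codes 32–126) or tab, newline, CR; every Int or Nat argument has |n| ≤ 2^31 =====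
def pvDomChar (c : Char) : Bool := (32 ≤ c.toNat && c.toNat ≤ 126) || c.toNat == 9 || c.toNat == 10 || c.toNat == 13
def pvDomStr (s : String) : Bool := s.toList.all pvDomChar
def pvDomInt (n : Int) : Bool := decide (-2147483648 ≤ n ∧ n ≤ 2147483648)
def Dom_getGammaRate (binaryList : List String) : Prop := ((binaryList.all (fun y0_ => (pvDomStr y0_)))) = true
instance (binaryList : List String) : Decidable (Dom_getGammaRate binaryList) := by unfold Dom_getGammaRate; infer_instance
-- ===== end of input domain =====

-- B replaces A's column-outer repeated scans of the list by a single row-pass building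
-- per-position one/zero count tables plus a separate decision pass (alternative decomposition).

-- ===== PORT A =====
def getGammaRate (binaryList : List String) : List String :=
  let first := (PySem.List.pyGet? binaryList 0).getD ""
  (PySem.List.pyRange 0 (PySem.Str.len first) 1).foldl (fun gammaRate i =>
    let cnts := binaryList.foldl (fun (p : Int × Int) j =>
      let c := (PySem.Str.pyGet? j i).getD ' '
      ((if c = '1' then p.1 + 1 else p.1), (if c = '0' then p.2 + 1 else p.2))) ((0 : Int), (0 : Int))
    let g1 := if cnts.1 > cnts.2 then gammaRate ++ ["0"] else gammaRate
    if cnts.2 > cnts.1 then g1 ++ ["1"] else g1) []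

-- ===== PORT B =====
def getGammaRate_alt (binaryList : List String) : List String :=
  let m := (PySem.Str.len ((PySem.List.pyGet? binaryList 0).getD "")).toNat
  let oz := binaryList.foldl (fun (oz : List Int × List Int) s =>
      (List.zipWith (fun o c => o + (if c = '1' then (1 : Int) else 0)) oz.1 s.toList,
       List.zipWith (fun z c => z + (if c = '0' then (1 : Int) else 0)) oz.2 s.toList))
    (List.replicate m (0 : Int), List.replicate m (0 : Int))
  (oz.1.zip oz.2).foldl (fun res (p : Int × Int) =>
    if p.1 > p.2 then res ++ ["0"]
    else if p.2 > p.1 then res ++ ["1"] else res) []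

-- ===== PRECONDITION & SPEC =====
-- Pre_ excludes exactly the inputs on which A raises: the empty list (IndexError on
-- binaryList[0]) and lists containing a string shorter than the first (IndexError on j[i]).
def Pre_getGammaRate (binaryList : List String) : Prop :=
  binaryList ≠ [] ∧ ∀ s ∈ binaryList, (binaryList.headD "").toList.length ≤ s.toList.length
instance (binaryList : List String) : Decidable (Pre_getGammaRate binaryList) := by
  unfold Pre_getGammaRate; infer_instance
def pvWitness_getGammaRate : List String := ["10", "11", "00"]
def Spec_getGammaRate (binaryList : List String) (out : List String) : Prop := out = getGammaRate_alt binaryList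
instance (binaryList : List String) (out : List String) : Decidable (Spec_getGammaRate binaryList out) := by unfold Spec_getGammaRate; infer_instance

-- ===== CLAIM (what is proved, stated in full; the proofs are below) =====
def Claim_equal_getGammaRate : Prop := ∀ (binaryList : List String), Dom_getGammaRate binaryList → Pre_getGammaRate binaryList → Spec_getGammaRate binaryList (getGammaRate binaryList)

-- ===== LEMMAS AND PROOFS =====

-- named forms (definitionally equal to the loop bodies of the two ports)
def pvInnerA (bl : List String) (i : Int) : Int × Int :=
  bl.foldl (fun (p : Int × Int) j =>
    let c := (PySem.Str.pyGet? j i).getD ' '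
    ((if c = '1' then p.1 + 1 else p.1), (if c = '0' then p.2 + 1 else p.2))) ((0 : Int), (0 : Int))

def pvStepA (bl : List String) (g : List String) (i : Int) : List String :=
  let cnts := pvInnerA bl i
  let g1 := if cnts.1 > cnts.2 then g ++ ["0"] else g
  if cnts.2 > cnts.1 then g1 ++ ["1"] else g1

def pvStepB (oz : List Int × List Int) (s : String) : List Int × List Int :=
  (List.zipWith (fun o c => o + (if c = '1' then (1 : Int) else 0)) oz.1 s.toList,
   List.zipWith (fun z c => z + (if c = '0' then (1 : Int) else 0)) oz.2 s.toList)

def pvRowPass (c : Char) (l : List Int) (s : String) : List Int :=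
  List.zipWith (fun o d => o + (if d = c then (1 : Int) else 0)) l s.toList

def pvStepD (res : List String) (p : Int × Int) : List String :=
  if p.1 > p.2 then res ++ ["0"]
  else if p.2 > p.1 then res ++ ["1"] else res

-- count of rows whose character at position j is c
def pvCnt (bl : List String) (j : Nat) (c : Char) : Int :=
  (bl.countP (fun s => s.toList[j]? = some c) : Int)

-- per-column output of the decision rule (note the inverted '0'/'1' mapping of A)
def pvColOut (bl : List String) (j : Nat) : List String :=
  if pvCnt bl j '1' > pvCnt bl j '0' then ["0"]
  else if pvCnt bl j '0' > pvCnt bl j '1' then ["1"] else []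

-- A's inner fold computes the two column counters
theorem pvA_inner (bl : List String) (j : Nat) (h : ∀ s ∈ bl, j < s.toList.length)
    (a b : Int) :
    bl.foldl (fun (p : Int × Int) s =>
      let c := (PySem.Str.pyGet? s (j : Int)).getD ' '
      ((if c = '1' then p.1 + 1 else p.1), (if c = '0' then p.2 + 1 else p.2))) (a, b)
    = (a + pvCnt bl j '1', b + pvCnt bl j '0') := by
  induction bl generalizing a b with
  | nil => simp [pvCnt]
  | cons s t ih =>
    have hs : j < s.toList.length := h s (by simp)
    have ht : ∀ s' ∈ t, j < s'.toList.length := fun s' hs' => h s' (by simp [hs'])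
    have hg : s.toList[j]? = some s.toList[j] := List.getElem?_eq_getElem hs
    simp only [List.foldl_cons, ih ht]
    simp [pvCnt, List.countP_cons, hg]
    constructor <;> split <;> simp_all <;> omega

theorem pvInnerA_eq (bl : List String) (j : Nat) (h : ∀ s ∈ bl, j < s.toList.length) :
    pvInnerA bl (j : Int) = (pvCnt bl j '1', pvCnt bl j '0') := by
  have := pvA_inner bl j h 0 0
  simpa [pvInnerA] using this

theorem pvStepA_eq (bl : List String) (j : Nat) (h : ∀ s ∈ bl, j < s.toList.length)
    (acc : List String) :
    pvStepA bl acc (j : Int) = acc ++ pvColOut bl j := by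
  unfold pvStepA pvColOut
  rw [pvInnerA_eq bl j h]
  dsimp only
  split_ifs <;> first | rfl | omega | simp

-- A's outer fold appends pvColOut per column
theorem pvA_outer (bl : List String) (m : Nat) (h : ∀ s ∈ bl, m ≤ s.toList.length) :
    ∀ (bnd : Nat), ∀ (a : Nat), a + bnd = m → ∀ (acc : List String),
    (PySem.List.pyRange (a : Int) (m : Int) 1).foldl (pvStepA bl) acc
    = acc ++ (List.range' a bnd).flatMap (pvColOut bl) := by
  intro bnd
  induction bnd with
  | zero =>
    intro a ha acc
    rw [PySem.List.pyRange_one_eq_nil (by exact_mod_cast (show m ≤ a by omega))]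
    simp
  | succ k ih =>
    intro a ha acc
    have hlt : (a : Int) < (m : Int) := by exact_mod_cast (show a < m by omega)
    rw [PySem.List.pyRange_one_cons hlt, List.foldl_cons]
    have hcast : (a : Int) + 1 = ((a + 1 : Nat) : Int) := by push_cast; ring
    rw [hcast, ih (a + 1) (by omega)]
    have hcol : ∀ s ∈ bl, a < s.toList.length :=
      fun s hs => Nat.lt_of_lt_of_le (by omega) (h s hs)
    rw [pvStepA_eq bl a hcol acc, List.range'_succ, List.flatMap_cons, List.append_assoc]

theorem pvA_total (bl : List String) (m : Nat) (h : ∀ s ∈ bl, m ≤ s.toList.length) :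
    (PySem.List.pyRange 0 (m : Int) 1).foldl (pvStepA bl) []
    = (List.range m).flatMap (pvColOut bl) := by
  have h0 := pvA_outer bl m h m 0 (by omega) []
  simpa [List.range_eq_range'] using h0

-- projection of B's simultaneous table fold into its two independent components
theorem pvB_proj (bl : List String) (u v : List Int) :
    bl.foldl pvStepB (u, v)
    = (bl.foldl (pvRowPass '1') u, bl.foldl (pvRowPass '0') v) := by
  induction bl generalizing u v with
  | nil => rfl
  | cons s t ih =>
    simp only [List.foldl_cons]
    rw [show pvStepB (u, v) s = (pvRowPass '1' u s, pvRowPass '0' v s) from rfl]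
    exact ih _ _

-- the row-pass preserves the table length
theorem pvB_len (c : Char) (bl : List String) (u : List Int)
    (h : ∀ s ∈ bl, u.length ≤ s.toList.length) :
    (bl.foldl (pvRowPass c) u).length = u.length := by
  induction bl generalizing u with
  | nil => rfl
  | cons s t ih =>
    have hs : u.length ≤ s.toList.length := h s (by simp)
    have hlen : (pvRowPass c u s).length = u.length := by
      rw [pvRowPass, List.length_zipWith]; omega
    simp only [List.foldl_cons]
    rw [ih _ (fun s' hs' => by rw [hlen]; exact h s' (by simp [hs'])), hlen]

-- the row-pass computes the per-column counters
theorem pvB_get (c : Char) (bl : List String) (u : List Int)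
    (h : ∀ s ∈ bl, u.length ≤ s.toList.length) (j : Nat) (hj : j < u.length) :
    (bl.foldl (pvRowPass c) u).getD j 0 = u.getD j 0 + pvCnt bl j c := by
  induction bl generalizing u with
  | nil => simp [pvCnt]
  | cons s t ih =>
    have hs : u.length ≤ s.toList.length := h s (by simp)
    have hlen : (pvRowPass c u s).length = u.length := by
      rw [pvRowPass, List.length_zipWith]; omega
    have hjs : j < s.toList.length := Nat.lt_of_lt_of_le hj hs
    have hg : s.toList[j]? = some s.toList[j] := List.getElem?_eq_getElem hjs
    simp only [List.foldl_cons]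
    rw [ih _ (fun s' hs' => by rw [hlen]; exact h s' (by simp [hs'])) (by rw [hlen]; exact hj)]
    have hz : (pvRowPass c u s).getD j 0 = u.getD j 0 + (if s.toList[j] = c then (1 : Int) else 0) := by
      rw [pvRowPass, List.getD_eq_getElem _ _ (by rw [List.length_zipWith]; omega), List.getD_eq_getElem _ _ hj, List.getElem_zipWith]
    rw [hz]
    simp [pvCnt, List.countP_cons, hg]
    split
    all_goals simp_all
    all_goals omega

-- B's decision fold over a zip of equal-length tables is a flatMap over positions
theorem pvB_final (u v : List Int) (hvu : v.length = u.length) (acc : List String) :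
    (u.zip v).foldl pvStepD acc
    = acc ++ (List.range u.length).flatMap (fun j =>
        if u.getD j 0 > v.getD j 0 then ["0"]
        else if v.getD j 0 > u.getD j 0 then ["1"] else []) := by
  have hz : u.zip v = (List.range u.length).map (fun j => (u.getD j 0, v.getD j 0)) := by
    apply List.ext_getElem
    · simp [List.length_zip, hvu]
    · intro i h1 h2
      have hiu : i < u.length := by simp [List.length_zip, hvu] at h1; omega
      simp only [List.getElem_zip, List.getElem_map, List.getElem_range]
      rw [List.getD_eq_getElem _ _ hiu, List.getD_eq_getElem _ _ (by omega)]
  have hfun : pvStepD = fun (res : List String) (p : Int × Int) =>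
      res ++ (if p.1 > p.2 then ["0"] else if p.2 > p.1 then ["1"] else []) := by
    funext res p
    unfold pvStepD
    split_ifs <;> simp
  rw [hz, hfun, PySem.List.foldl_append_eq_flatMap, List.flatMap_map]

-- ===== VERDICT (by name: the statement is the Claim_ definition above) =====
theorem getGammaRate_spec : Claim_equal_getGammaRate := by
  intro bl _dom hpre
  obtain ⟨hne, hlen⟩ := hpre
  obtain ⟨s0, t, rfl⟩ : ∃ s0 t, bl = s0 :: t := by
    cases bl with
    | nil => exact absurd rfl hne
    | cons a l => exact ⟨a, l, rfl⟩
  unfold Spec_getGammaRate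
  have hlen' : ∀ s ∈ (s0 :: t), s0.toList.length ≤ s.toList.length := by
    intro s hs
    exact hlen s hs
  have hfirst : (PySem.List.pyGet? (s0 :: t) 0).getD "" = s0 := by
    simp [PySem.List.pyGet?, PySem.List.pyIdx?]
  -- A's side: its loop body is definitionally pvStepA
  have hAeq : getGammaRate (s0 :: t)
      = (PySem.List.pyRange 0 (PySem.Str.len ((PySem.List.pyGet? (s0 :: t) 0).getD "")) 1).foldl
          (pvStepA (s0 :: t)) [] := rfl
  rw [hfirst, PySem.Str.len_eq] at hAeq
  -- B's side: its two loop bodies are definitionally pvStepB and pvStepD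
  have hBeq : getGammaRate_alt (s0 :: t)
      = ((((s0 :: t).foldl pvStepB
            (List.replicate (PySem.Str.len ((PySem.List.pyGet? (s0 :: t) 0).getD "")).toNat (0 : Int),
             List.replicate (PySem.Str.len ((PySem.List.pyGet? (s0 :: t) 0).getD "")).toNat (0 : Int))).1.zip
          ((s0 :: t).foldl pvStepB
            (List.replicate (PySem.Str.len ((PySem.List.pyGet? (s0 :: t) 0).getD "")).toNat (0 : Int),
             List.replicate (PySem.Str.len ((PySem.List.pyGet? (s0 :: t) 0).getD "")).toNat (0 : Int))).2).foldl
          pvStepD []) := rfl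
  rw [hfirst, PySem.Str.len_eq, Int.toNat_natCast] at hBeq
  rw [hAeq, hBeq, pvA_total (s0 :: t) s0.toList.length hlen', pvB_proj]
  have h1 : ∀ s ∈ (s0 :: t), (List.replicate s0.toList.length (0 : Int)).length ≤ s.toList.length := by
    rw [List.length_replicate]; exact hlen'
  have hl1 := pvB_len '1' (s0 :: t) (List.replicate s0.toList.length 0) h1
  have hl0 := pvB_len '0' (s0 :: t) (List.replicate s0.toList.length 0) h1
  rw [pvB_final _ _ (by rw [hl1, hl0]), hl1, List.length_replicate, List.nil_append]
  apply List.flatMap_congr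
  intro j hj
  have hjm : j < s0.toList.length := List.mem_range.mp hj
  rw [pvB_get '1' (s0 :: t) _ h1 j (by rw [List.length_replicate]; exact hjm),
      pvB_get '0' (s0 :: t) _ h1 j (by rw [List.length_replicate]; exact hjm)]
  simp [List.getD, List.getElem?_replicate, pvColOut]
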